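-- pv_equiv track=rewrite | github.com/JimmyHwang/DfPlayerFolderManager | DfPlayerFolderManager.py | GetFirstPathNode
-- ===== SOURCE A (Python) =====
-- def GetFirstPathNode(full):
--   separator = "/"
--   items = full.split("/")
--   path_node = False
--   remind_nodes = []
--   for item in items:
--     if path_node != False:
--       remind_nodes.append(item)
--     elif item != ".":
--       path_node = item
--   if len(remind_nodes) == 0:
--     remind_path = "."
--   else:
--     remind_path = separator.join(remind_nodes)
--   return path_node, remind_path
-- ===== SOURCE B (Python) =====
-- def GetFirstPathNode(full):
--     items = full.split("/")
--     i = 0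
--     while i < len(items) and items[i] == ".":
--         i += 1
--     if i == len(items):
--         return False, "."
--     rest = items[i + 1:]
--     return items[i], ("/".join(rest) if rest else ".")
-- ===== Notes on version B (the rewrite author's own statement) =====
-- stated objective: simpler
-- what changed: Replaces the flag-controlled accumulate-every-element loop with find-the-first-non-'.'-segment (a while loop) followed by a slice and a single join.
-- outside the precondition, e.g. on GetFirstPathNode('.'): A returns (False, '.'), B returns (False, '.'); on GetFirstPathNode('././.'): A returns (False, '.'), B returns (False, '.')
import Mathlib
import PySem

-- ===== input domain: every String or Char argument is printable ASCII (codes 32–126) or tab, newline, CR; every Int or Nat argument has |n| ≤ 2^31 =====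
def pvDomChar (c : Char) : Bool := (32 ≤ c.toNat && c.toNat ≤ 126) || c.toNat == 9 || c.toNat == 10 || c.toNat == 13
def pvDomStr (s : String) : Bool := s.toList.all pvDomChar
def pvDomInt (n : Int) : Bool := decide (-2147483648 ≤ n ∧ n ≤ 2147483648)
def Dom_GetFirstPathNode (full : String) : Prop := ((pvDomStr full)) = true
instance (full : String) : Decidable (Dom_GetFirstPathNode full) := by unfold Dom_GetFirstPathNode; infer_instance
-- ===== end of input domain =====

-- B replaces A's flag-controlled accumulate-every-element loop by: advance to the first
-- non-"." segment, then slice off the tail and join it once (simpler decomposition).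

-- ===== PORT A =====
-- path_node = False is modelled as 'none'; under Pre_ it always ends up 'some _'.
def GetFirstPathNode (full : String) : String × String :=
  let separator := "/"
  let items := (PySem.Str.split? full "/").getD []   -- exact: sep = "/" ≠ "" so split? is 'some'
  let st := items.foldl (fun (st : Option String × List String) item =>
    if st.1 ≠ none then (st.1, st.2 ++ [item])
    else if item ≠ "." then (some item, st.2) else st) (none, [])
  let remind_path := if st.2.length = 0 then "." else PySem.Str.join separator st.2
  (st.1.getD "", remind_path)   -- Python returns (False, ".") when st.1 = none; excluded by Pre_

-- ===== PORT B =====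
def GetFirstPathNode_alt (full : String) : String × String :=
  let items := (PySem.Str.split? full "/").getD []
  match items.dropWhile (· == ".") with        -- the while loop advancing over leading "."
  | [] => ("", ".")                            -- B's Python returns (False, "."); excluded by Pre_
  | node :: rest => (node, if rest.isEmpty then "." else PySem.Str.join "/" rest)

-- ===== PRECONDITION & SPEC =====
-- Pre_ excludes inputs whose every separator-delimited segment is "." : there the Python functions return
-- the sentinel (False, "."), whose first component is not a String (outside the declared type).
def Pre_GetFirstPathNode (full : String) : Prop :=
  ∃ x ∈ (PySem.Str.split? full "/").getD [], x ≠ "."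
instance (full : String) : Decidable (Pre_GetFirstPathNode full) := by
  unfold Pre_GetFirstPathNode; infer_instance

def pvWitness_GetFirstPathNode : String := "./a/b"

def Spec_GetFirstPathNode (full : String) (out : String × String) : Prop := out = GetFirstPathNode_alt full
instance (full : String) (out : String × String) : Decidable (Spec_GetFirstPathNode full out) := by unfold Spec_GetFirstPathNode; infer_instance

-- ===== CLAIM (what is proved, stated in full; the proofs are below) =====
def Claim_equal_GetFirstPathNode : Prop := ∀ (full : String), Dom_GetFirstPathNode full → Pre_GetFirstPathNode full → Spec_GetFirstPathNode full (GetFirstPathNode full)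

-- ===== LEMMAS AND PROOFS =====

-- A's loop step, named for the lemmas below.
def pvStepA (st : Option String × List String) (item : String) : Option String × List String :=
  if st.1 ≠ none then (st.1, st.2 ++ [item])
  else if item ≠ "." then (some item, st.2) else st

lemma pvFoldA_some (t : List String) (p : String) (acc : List String) :
    t.foldl pvStepA (some p, acc) = (some p, acc ++ t) := by
  induction t generalizing acc with
  | nil => simp
  | cons h tl ih => simp [pvStepA, ih]

lemma pvFoldA_none (l : List String) (acc : List String) :
    l.foldl pvStepA (none, acc) =
      match l.dropWhile (· == ".") with
      | [] => (none, acc)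
      | h :: t => (some h, acc ++ t) := by
  induction l with
  | nil => simp
  | cons h tl ih =>
    by_cases hd : h = "."
    · subst hd
      simpa [pvStepA, List.dropWhile] using ih
    · have hb : (h == ".") = false := by simp [hd]
      simp [pvStepA, hd, List.dropWhile, hb, pvFoldA_some]

-- ===== VERDICT (by name: the statement is the Claim_ definition above) =====
theorem GetFirstPathNode_spec : Claim_equal_GetFirstPathNode := by
  intro full _ hpre
  unfold Spec_GetFirstPathNode GetFirstPathNode GetFirstPathNode_alt
  have hfold := pvFoldA_none ((PySem.Str.split? full "/").getD []) []
  have hne : ((PySem.Str.split? full "/").getD []).dropWhile (· == ".") ≠ [] := by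
    obtain ⟨x, hx, hxne⟩ := hpre
    intro hnil
    exact hxne (by simpa using List.dropWhile_eq_nil_iff.mp hnil x hx)
  cases hdw : ((PySem.Str.split? full "/").getD []).dropWhile (· == ".") with
  | nil => exact absurd hdw hne
  | cons node rest =>
    show ((((PySem.Str.split? full "/").getD []).foldl
        (fun (st : Option String × List String) item =>
          if st.1 ≠ none then (st.1, st.2 ++ [item])
          else if item ≠ "." then (some item, st.2) else st) (none, [])).1.getD "",
        _) = _
    rw [show (fun (st : Option String × List String) item =>
          if st.1 ≠ none then (st.1, st.2 ++ [item])
          else if item ≠ "." then (some item, st.2) else st) = pvStepA from rfl]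
    rw [hdw] at hfold
    rw [hfold]
    cases rest with
    | nil => simp [hdw]
    | cons r rs => simp [hdw, List.length_eq_zero_iff]
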